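-- pv_equiv track=rewrite | github.com/DooHongKm/Algorithm_Solutions | 프로그래머스/2/60058. 괄호 변환/괄호 변환.py | check
-- ===== SOURCE A (Python) =====
-- def check(string):
--
--     idx = -1
--     count = 0
--     right = True
--
--     for i, s in enumerate(string):
--         if s == "(":
--             count += 1
--         else:
--             count -= 1
--         if count == 0 and idx < 0:
--             idx = i + 1
--         if count < 0:
--             right = False
--         if not right and idx > 0:
--             break
--
--     return -1 if right else idx
-- ===== SOURCE B (Python) =====
-- def check(string):
--     # Build the table of running prefix sums, then answer in two separate passes.
--     sums = []
--     c = 0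
--     for ch in string:
--         c += 1 if ch == "(" else -1
--         sums.append(c)
--     if all(s >= 0 for s in sums):
--         return -1
--     for i, s in enumerate(sums):
--         if s == 0:
--             return i + 1
--     return -1
-- ===== Notes on version B (the rewrite author's own statement) =====
-- stated objective: alternative
-- what changed: Replaces A's single stateful loop (idx/count/right flags with an early break) by a prefix-sum table derived once and two independent passes over it: an all(>=0) test and a first-zero-index search.
import Mathlib
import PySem

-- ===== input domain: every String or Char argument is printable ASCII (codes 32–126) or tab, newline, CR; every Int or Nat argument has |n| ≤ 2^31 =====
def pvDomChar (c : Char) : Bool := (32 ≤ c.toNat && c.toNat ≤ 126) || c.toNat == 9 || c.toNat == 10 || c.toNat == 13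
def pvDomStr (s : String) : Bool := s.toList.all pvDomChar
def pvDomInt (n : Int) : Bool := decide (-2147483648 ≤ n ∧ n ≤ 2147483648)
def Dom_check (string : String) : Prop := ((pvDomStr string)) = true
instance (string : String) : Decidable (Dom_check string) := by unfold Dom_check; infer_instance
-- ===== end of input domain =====

-- ===== PORT A =====
-- B differs from A: prefix-sum table built once, then two independent passes (alternative decomposition; same O(n) cost).
-- Loop of A: state (idx, count, right), early break when ¬right ∧ idx > 0.
def checkLoop : List (Int × Char) → Int → Int → Bool → Int × Bool
  | [], idx, _, right => (idx, right)
  | (i, s) :: rest, idx, count, right =>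
    let count := if s = '(' then count + 1 else count - 1
    let idx := if count = 0 ∧ idx < 0 then i + 1 else idx
    let right := if count < 0 then false else right
    if ¬ right ∧ idx > 0 then (idx, right)
    else checkLoop rest idx count right

def check (string : String) : Int :=
  let r := checkLoop (PySem.List.enumerate string.toList) (-1) 0 true
  if r.2 then -1 else r.1

-- ===== PORT B =====
-- running prefix sums of +1/-1
def sumsLoop : List Char → Int → List Int
  | [], _ => []
  | ch :: rest, c =>
    let c := c + (if ch = '(' then 1 else -1)
    c :: sumsLoop rest c

-- 1-based index of the first zero, -1 if none
def firstZero : List (Int × Int) → Int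
  | [] => -1
  | (i, s) :: rest => if s = 0 then i + 1 else firstZero rest

def check_alt (string : String) : Int :=
  let sums := sumsLoop string.toList 0
  if sums.all (fun s => decide (0 ≤ s)) then -1
  else firstZero (PySem.List.enumerate sums)

-- ===== PRECONDITION & SPEC =====
def Spec_check (string : String) (out : Int) : Prop := out = check_alt string
instance (string : String) (out : Int) : Decidable (Spec_check string out) := by unfold Spec_check; infer_instance

-- ===== CLAIM (what is proved, stated in full; the proofs are below) =====
def Claim_equal_check : Prop := ∀ (string : String), Dom_check string → Spec_check string (check string)

-- ===== LEMMAS AND PROOFS =====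

theorem checkLoop_eq (l : List Char) (k idx c : Int) (right : Bool)
    (hk : 0 ≤ k) (h1 : ¬(right = false ∧ idx > 0)) (h2 : idx = -1 ∨ idx > 0) :
    (if (checkLoop (PySem.List.enumerate l k) idx c right).2 then (-1 : Int)
     else (checkLoop (PySem.List.enumerate l k) idx c right).1) =
    (if right ∧ (sumsLoop l c).all (fun s => decide (0 ≤ s)) then -1
     else if idx > 0 then idx
     else firstZero (PySem.List.enumerate (sumsLoop l c) k)) := by
  induction l generalizing k idx c right with
  | nil =>
    simp [PySem.List.enumerate_nil, checkLoop, sumsLoop, firstZero]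
    cases right with
    | true => simp
    | false =>
      have hnp : ¬ idx > 0 := fun h => h1 ⟨rfl, h⟩
      omega
  | cons ch rest ih =>
    rw [PySem.List.enumerate_cons]
    set c' : Int := if ch = '(' then c + 1 else c - 1 with hc'
    have harith : c + (if ch = '(' then (1:Int) else -1) = c' := by
      rw [hc']; split <;> ring
    have hsums : sumsLoop (ch :: rest) c = c' :: sumsLoop rest c' := by
      simp only [sumsLoop, harith]
    set idx' : Int := if c' = 0 ∧ idx < 0 then k + 1 else idx with hidx'
    set right' : Bool := if c' < 0 then false else right with hright'
    have hstep : checkLoop ((k, ch) :: PySem.List.enumerate rest (k + 1)) idx c right =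
        if ¬ right' ∧ idx' > 0 then (idx', right')
        else checkLoop (PySem.List.enumerate rest (k + 1)) idx' c' right' := by
      simp only [checkLoop, ← hc', ← hidx', ← hright']
    rw [hstep, hsums, PySem.List.enumerate_cons]
    by_cases hb : ¬ right' ∧ idx' > 0
    · -- break case
      rw [if_pos hb]
      obtain ⟨hr', hi'⟩ := hb
      have hrf : right' = false := by simp at hr'; exact hr'
      simp only [hrf]
      simp only [Bool.false_eq_true, if_false]
      by_cases hz : c' = 0 ∧ idx < 0
      · -- idx' = k+1, right' = right (c' = 0 not < 0), so right = false
        have hc0 : c' = 0 := hz.1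
        have : right' = right := by rw [hright', if_neg (by omega)]
        have hrfalse : right = false := by rw [← this]; exact hrf
        have hnpos : ¬ 0 < idx := by omega
        simp [hrfalse, hidx', hz, firstZero, hnpos]
      · -- idx' = idx > 0, so right = true (by h1), hence c' < 0
        have hidxeq : idx' = idx := by rw [hidx', if_neg hz]
        have hipos : idx > 0 := by rw [← hidxeq]; exact hi'
        have hrt : right = true := by
          cases right with
          | true => rfl
          | false => exact absurd ⟨rfl, hipos⟩ h1
        have hcneg : c' < 0 := by
          by_contra hge
          have : right' = right := by rw [hright', if_neg hge]
          rw [this, hrt] at hrf; exact absurd hrf (by simp)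
        have hall : ((c' :: sumsLoop rest c').all (fun s => decide (0 ≤ s))) = false := by
          simp [List.all_cons]; intro h; omega
        simp [hall, hrt, hipos, hidxeq]
    · -- continue case
      rw [if_neg hb]
      have hrec := ih (k + 1) idx' c' right' (by omega)
        (by intro hh; exact hb ⟨by simp [hh.1], hh.2⟩)
        (by by_cases hz : c' = 0 ∧ idx < 0
            · right; rw [hidx', if_pos hz]; omega
            · rw [hidx', if_neg hz]; exact h2)
      rw [hrec]
      by_cases hcneg : c' < 0
      · -- right' = false; no break → idx' = idx = -1
        have hr' : right' = false := by rw [hright', if_pos hcneg]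
        have hidxeq : idx' = idx := by rw [hidx', if_neg (by omega)]
        have hnp : ¬ idx' > 0 := fun h => hb ⟨by simp [hr'], h⟩
        have hm1 : idx = -1 := by omega
        have hall : ((c' :: sumsLoop rest c').all (fun s => decide (0 ≤ s))) = false := by
          simp [List.all_cons]; intro h; omega
        simp [hall, hr', hidxeq, hm1, firstZero, show c' ≠ 0 by omega]
      · have hr' : right' = right := by rw [hright', if_neg hcneg]
        by_cases hc0 : c' = 0
        · have hall : ((c' :: sumsLoop rest c').all (fun s => decide (0 ≤ s))) =
              ((sumsLoop rest c').all (fun s => decide (0 ≤ s))) := by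
            simp [List.all_cons, hc0]
          by_cases hzn : idx < 0
          · have hidxeq : idx' = k + 1 := by rw [hidx', if_pos ⟨hc0, hzn⟩]
            have hrt : right = true := by
              cases right with
              | true => rfl
              | false =>
                refine absurd ⟨?_, ?_⟩ hb
                · simp [hr']
                · rw [hidxeq]; omega
            have hnpos : ¬ idx > 0 := by omega
            simp [hr', hrt, hidxeq, hnpos, firstZero, hc0, hk]
          · have hidxeq : idx' = idx := by
              rw [hidx', if_neg (by intro h; exact hzn h.2)]
            have hipos : idx > 0 := by omega
            simp [hall, hr', hidxeq, hipos]
        · -- c' > 0 : nothing changes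
          have hidxeq : idx' = idx := by rw [hidx', if_neg (by intro h; exact hc0 h.1)]
          have hall : ((c' :: sumsLoop rest c').all (fun s => decide (0 ≤ s))) =
              ((sumsLoop rest c').all (fun s => decide (0 ≤ s))) := by
            simp [List.all_cons]; omega
          simp [hall, hr', hidxeq, firstZero, hc0]

theorem check_spec : Claim_equal_check := by
  intro string _
  unfold Spec_check check check_alt
  have h := checkLoop_eq string.toList 0 (-1) 0 true (by omega) (by simp) (Or.inl rfl)
  simp only at h
  rw [h]
  simp
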